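-- pv_equiv track=rewrite | github.com/shayk96/huji-intro-to-cs | Ex4/hangman.py | word_fits_pattern
-- ===== SOURCE A (Python) =====
-- def word_fits_pattern(word, pattern):
--     """
--     checks if the word is in the right length and has the right letters
--     :param word: word being checked
--     :param pattern: the current pattern
--     :return: True if the word is an option , else False
--     """
--     if len(word) != len(pattern):
--         return False
--     for i in range(len(pattern)):
--         if pattern[i] != "_":
--             if pattern[i] != word[i]:
--                 return False
--             if pattern.count(pattern[i]) != word.count(word[i]):
--                 return False
--     return True
-- ===== SOURCE B (Python) =====
-- def word_fits_pattern(word, pattern):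
--     """Mask-and-compare: the word fits iff masking the word by the pattern's
--     revealed letters reproduces the pattern exactly (no per-letter counting)."""
--     if len(word) != len(pattern):
--         return False
--     revealed = set(pattern) - {"_"}
--     masked = "".join(c if c in revealed else "_" for c in word)
--     return masked == pattern
-- ===== Notes on version B (the rewrite author's own statement) =====
-- stated objective: faster
-- what changed: A loops over positions calling pattern.count/word.count at every revealed position; B computes the set of revealed letters, masks the word by it (keep a letter iff it is revealed) and tests the masked word for string equality with the pattern - no counting at all.
import Mathlib
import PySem

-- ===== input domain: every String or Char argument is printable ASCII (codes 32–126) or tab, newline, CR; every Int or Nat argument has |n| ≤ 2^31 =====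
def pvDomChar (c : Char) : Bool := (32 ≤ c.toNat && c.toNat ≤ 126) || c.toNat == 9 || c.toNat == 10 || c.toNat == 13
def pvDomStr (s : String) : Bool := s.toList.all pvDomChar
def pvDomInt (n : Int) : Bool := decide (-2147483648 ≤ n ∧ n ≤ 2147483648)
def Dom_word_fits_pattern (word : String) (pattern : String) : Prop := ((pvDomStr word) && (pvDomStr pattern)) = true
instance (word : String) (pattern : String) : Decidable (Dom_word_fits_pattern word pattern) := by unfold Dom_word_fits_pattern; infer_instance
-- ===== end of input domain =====

-- B replaces A's per-position loop with its redundant count comparisons by masking the word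
-- through the set of revealed pattern letters and comparing the masked word with the pattern
-- (objective: faster).

-- ===== PORT A =====
-- for i in range(len(pattern)): since the length guard has passed, the index loop is the
-- simultaneous structural recursion on the two (equal-length) character lists; the full
-- lists are kept for the str.count calls (single-char substring count = char count).
def aLoop (w p : List Char) : List Char → List Char → Bool
  | pc :: pr, wc :: wr =>
    if pc ≠ '_' then
      if pc ≠ wc then false
      else if p.count pc ≠ w.count wc then false
      else aLoop w p pr wr
    else aLoop w p pr wr
  | _, _ => true

def word_fits_pattern (word : String) (pattern : String) : Bool :=
  if word.toList.length ≠ pattern.toList.length then false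
  else aLoop word.toList pattern.toList pattern.toList word.toList

-- ===== PORT B =====
-- revealed = set(pattern) - {"_"}; masked = ''.join(c if c in revealed else '_' for c in word);
-- return masked == pattern  (string equality on the list-of-chars side)
def word_fits_pattern_alt (word : String) (pattern : String) : Bool :=
  if word.toList.length ≠ pattern.toList.length then false
  else
    let revealed : PySem.Set Char := PySem.Set.diff (PySem.Set.ofList pattern.toList) ['_']
    let masked : List Char := word.toList.map (fun c => if c ∈ revealed then c else '_')
    masked == pattern.toList

-- ===== PRECONDITION & SPEC =====
def Spec_word_fits_pattern (word : String) (pattern : String) (out : Bool) : Prop := out = word_fits_pattern_alt word pattern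
instance (word : String) (pattern : String) (out : Bool) : Decidable (Spec_word_fits_pattern word pattern out) := by unfold Spec_word_fits_pattern; infer_instance

-- ===== CLAIM (what is proved, stated in full; the proofs are below) =====
def Claim_equal_word_fits_pattern : Prop := ∀ (word : String) (pattern : String), Dom_word_fits_pattern word pattern → Spec_word_fits_pattern word pattern (word_fits_pattern word pattern)

-- ===== LEMMAS AND PROOFS =====

-- A's loop returns true iff every revealed zipped pair matches and has equal counts
theorem aLoop_eq_true (w p : List Char) :
    ∀ (pr wr : List Char), aLoop w p pr wr = true ↔
      ∀ x ∈ pr.zip wr, x.1 ≠ '_' → x.1 = x.2 ∧ p.count x.1 = w.count x.2 := by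
  intro pr
  induction pr with
  | nil => intro wr; simp [aLoop]
  | cons pc pr ih =>
    intro wr
    cases wr with
    | nil => simp [aLoop]
    | cons wc wr =>
      simp only [aLoop, List.zip_cons_cons, List.forall_mem_cons]
      split_ifs with h1 h2 h3 <;> simp_all

-- on equal-length lists, counting a letter in one list is counting it on that side of the zip
theorem count_eq_countP_zip (c : Char) :
    ∀ (p w : List Char), p.length = w.length →
      (p.count c = (p.zip w).countP (fun x => x.1 == c) ∧
       w.count c = (p.zip w).countP (fun x => x.2 == c)) := by
  intro p
  induction p with
  | nil =>
    intro w h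
    have hw : w = [] := by cases w <;> simp_all
    subst hw; simp
  | cons pc pr ih =>
    intro w h
    cases w with
    | nil => simp at h
    | cons wc wr =>
      simp only [List.length_cons, Nat.succ.injEq] at h
      obtain ⟨h1, h2⟩ := ih wr h
      constructor <;>
        simp [List.count_cons, List.countP_cons, h1, h2, Nat.add_comm]

-- pointwise strict count inequality on a list with one extra witness
theorem countP_lt_of_witness {α : Type} (P Q : α → Bool) :
    ∀ (l : List α), (∀ a ∈ l, P a = true → Q a = true) →
      ∀ x ∈ l, Q x = true → P x = false → l.countP P < l.countP Q := by
  intro l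
  induction l with
  | nil => simp
  | cons a l ih =>
    intro himp x hx hq hp
    simp only [List.forall_mem_cons] at himp
    simp only [List.countP_cons]
    rcases List.mem_cons.mp hx with rfl | hx'
    · have hle : l.countP P ≤ l.countP Q := List.countP_mono_left (fun a ha => himp.2 a ha)
      rw [hp, hq]
      simp
      omega
    · have hlt := ih himp.2 x hx' hq hp
      have hone : (if P a = true then 1 else 0) ≤ (if Q a = true then 1 else 0) := by
        by_cases hpa : P a = true
        · simp [hpa, himp.1 hpa]
        · simp [hpa]
      omega

-- map equals the other list iff pointwise on the zip (equal lengths)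
theorem map_eq_iff_zip (f : Char → Char) :
    ∀ (w p : List Char), w.length = p.length →
      (w.map f = p ↔ ∀ x ∈ p.zip w, f x.2 = x.1) := by
  intro w
  induction w with
  | nil => intro p h; cases p <;> simp_all
  | cons wc wr ih =>
    intro p h
    cases p with
    | nil => simp at h
    | cons pc pr =>
      simp only [List.length_cons, Nat.succ.injEq] at h
      rw [List.map_cons, List.zip_cons_cons]
      constructor
      · intro he
        rw [List.cons_eq_cons] at he
        intro x hx
        rcases List.mem_cons.mp hx with rfl | hx'
        · exact he.1
        · exact ((ih pr h).mp he.2) x hx'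
      · intro hall
        rw [List.cons_eq_cons]
        exact ⟨hall (pc, wc) (List.mem_cons_self), (ih pr h).mpr (fun x hx => hall x (List.mem_cons_of_mem _ hx))⟩

-- membership in B's revealed set
theorem mem_revealed (p : List Char) (c : Char) :
    c ∈ PySem.Set.diff (PySem.Set.ofList p) ['_'] ↔ c ∈ p ∧ c ≠ '_' := by
  rw [PySem.Set.mem_diff, PySem.Set.mem_ofList]
  simp

-- membership of the first components of a zip of equal-length lists
theorem mem_fst_zip {p w : List Char} (h : p.length = w.length) {c : Char} (hc : c ∈ p) :
    ∃ x ∈ p.zip w, x.1 = c := by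
  have : c ∈ (p.zip w).map Prod.fst := by
    rw [List.map_fst_zip (le_of_eq h)]; exact hc
  obtain ⟨x, hx, hfst⟩ := List.mem_map.mp this
  exact ⟨x, hx, hfst⟩

theorem main_eq (w p : List Char) (h : p.length = w.length) :
    aLoop w p p w =
      (w.map (fun c => if c ∈ PySem.Set.diff (PySem.Set.ofList p) ['_'] then c else '_') == p) := by
  rw [Bool.eq_iff_iff, aLoop_eq_true, beq_iff_eq, map_eq_iff_zip _ _ _ h.symm]
  constructor
  · -- A → B: every zipped pair is reproduced by the mask
    intro ha x hx
    by_cases hu : x.1 = '_'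
    · -- pattern '_': show the word letter is not revealed
      rw [hu]
      rw [if_neg]
      rw [mem_revealed]
      rintro ⟨hmem, hne⟩
      obtain ⟨y, hy, hfst⟩ := mem_fst_zip h hmem
      have hya := ha y hy (by rw [hfst]; exact hne)
      -- p.count x.2 = w.count x.2, yet w has strictly more x.2's
      have hcnt : p.count x.2 = w.count x.2 := by
        have := hya.2; rwa [hfst, ← hya.1, hfst] at this
      obtain ⟨hcp, hcw⟩ := count_eq_countP_zip x.2 p w h
      have himp : ∀ y ∈ p.zip w, (y.1 == x.2) = true → (y.2 == x.2) = true := by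
        intro y hy h1
        have h1' : y.1 = x.2 := by simpa using h1
        have := (ha y hy (by rw [h1']; exact hne)).1
        simp [← this, h1']
      have hlt := countP_lt_of_witness _ _ (p.zip w) himp x hx
        (by simp) (by simp [hu]; exact fun hh => hne hh.symm)
      omega
    · obtain ⟨h1, _⟩ := ha x hx hu
      rw [← h1, if_pos (by rw [mem_revealed]; exact ⟨(List.of_mem_zip hx).1, hu⟩)]
  · -- B → A: the mask forces the positional match and the count equality
    intro hb x hx hu
    have hmx := hb x hx
    have hxr : x.2 ∈ PySem.Set.diff (PySem.Set.ofList p) ['_'] := by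
      by_contra hc
      rw [if_neg hc] at hmx
      exact hu hmx.symm
    rw [if_pos hxr] at hmx
    refine ⟨hmx.symm, ?_⟩
    obtain ⟨hcp, hcw⟩ := count_eq_countP_zip x.1 p w h
    rw [hcp, hmx, hcw]
    apply List.countP_congr
    intro y hy
    have hmy := hb y hy
    have hrev : x.1 ∈ PySem.Set.diff (PySem.Set.ofList p) ['_'] := by
      rwa [hmx] at hxr
    constructor
    · intro h1
      have h1' : y.1 = x.1 := by simpa using h1
      have : (if y.2 ∈ PySem.Set.diff (PySem.Set.ofList p) ['_'] then y.2 else '_') = x.1 := by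
        rw [hmy, h1']
      by_cases hc : y.2 ∈ PySem.Set.diff (PySem.Set.ofList p) ['_']
      · rw [if_pos hc] at this; simp [this]
      · rw [if_neg hc] at this; exact absurd this.symm hu
    · intro h2
      have h2' : y.2 = x.1 := by simpa using h2
      rw [h2', if_pos hrev] at hmy
      simp [← hmy]

-- ===== VERDICT (by name: the statement is the Claim_ definition above) =====
theorem word_fits_pattern_spec : Claim_equal_word_fits_pattern := by
  intro word pattern _
  unfold Spec_word_fits_pattern word_fits_pattern word_fits_pattern_alt
  by_cases h : word.toList.length = pattern.toList.length
  · rw [if_neg (by simp [h]), if_neg (by simp [h])]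
    exact main_eq word.toList pattern.toList h.symm
  · rw [if_pos (by simpa using h), if_pos (by simpa using h)]
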